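-- pv_equiv track=rewrite | github.com/emorynlp/elit | elit/utils/string_util.py | split_long_sent
-- ===== SOURCE A (Python) =====
-- def split_long_sent(sent, delimiters, max_seq_length):
--     parts = []
--     offset = 0
--     for idx, char in enumerate(sent):
--         if char in delimiters:
--             parts.append(sent[offset:idx + 1])
--             offset = idx + 1
--     if not parts:
--         yield sent
--         return
--     short = []
--     for idx, part in enumerate(parts):
--         short += part
--         if idx == len(parts) - 1:
--             yield short
--         else:
--             if len(short) + len(parts[idx + 1]) > max_seq_length:
--                 yield short
--                 short = []
-- ===== SOURCE B (Python) =====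
-- def split_long_sent(sent, delimiters, max_seq_length):
--     delims = set(delimiters)
--     chunk = []
--     part = []
--     seen = False
--     for char in sent:
--         part.append(char)
--         if char in delims:
--             seen = True
--             if chunk and len(chunk) + len(part) > max_seq_length:
--                 yield chunk
--                 chunk = []
--             chunk.extend(part)
--             part = []
--     if not seen:
--         yield sent
--     else:
--         yield chunk
-- ===== Notes on version B (the rewrite author's own statement) =====
-- stated objective: alternative
-- what changed: Replaces A's two-phase algorithm (build a parts list via enumerate+slicing, then merge with a look-ahead at parts[idx+1]) by a single fused pass over the characters that accumulates the current part in place and flushes the running chunk with a look-behind check, never materializing the parts list or taking slices; delimiter membership goes through a set.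
import Mathlib
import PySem

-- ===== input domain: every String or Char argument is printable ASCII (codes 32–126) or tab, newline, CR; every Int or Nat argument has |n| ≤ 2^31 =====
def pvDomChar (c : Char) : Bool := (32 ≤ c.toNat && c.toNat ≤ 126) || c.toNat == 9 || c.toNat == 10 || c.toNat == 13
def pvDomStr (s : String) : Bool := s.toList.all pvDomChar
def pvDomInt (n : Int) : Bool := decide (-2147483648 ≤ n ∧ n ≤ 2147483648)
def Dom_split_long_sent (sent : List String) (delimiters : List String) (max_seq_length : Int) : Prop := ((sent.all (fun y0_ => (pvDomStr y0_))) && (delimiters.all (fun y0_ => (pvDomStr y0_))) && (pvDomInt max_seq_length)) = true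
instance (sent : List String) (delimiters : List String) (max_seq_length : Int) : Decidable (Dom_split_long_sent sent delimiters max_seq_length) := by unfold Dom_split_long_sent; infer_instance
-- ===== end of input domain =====

-- B fuses A's two phases (slice-built parts list + look-ahead merge) into one look-behind pass over the characters (objective: alternative).


-- ===== PORT A =====
-- literal transliteration: first loop over enumerate(sent) building (parts, offset) with slices,
-- then (if parts nonempty) the merge loop over enumerate(parts) with the look-ahead parts[idx+1]
-- (always in range in that branch; ported as pyGet? ... |>.getD []).
-- body of A's first for-loop
def stepA1 (sent delimiters : List String) (st : List (List String) × Int) (ic : Int × String) : List (List String) × Int :=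
  if delimiters.contains ic.2 then
    (st.1 ++ [PySem.List.slice sent (some st.2) (some (ic.1 + 1))], ic.1 + 1)
  else st

-- body of A's second for-loop
def stepA2 (parts : List (List String)) (max_seq_length : Int) (st : List (List String) × List String) (ip : Int × List String) : List (List String) × List String :=
  let short := st.2 ++ ip.2
  if ip.1 = (parts.length : Int) - 1 then (st.1 ++ [short], short)
  else if (short.length : Int) + (((PySem.List.pyGet? parts (ip.1 + 1)).getD []).length : Int) > max_seq_length then
    (st.1 ++ [short], [])
  else (st.1, short)

def split_long_sent (sent : List String) (delimiters : List String) (max_seq_length : Int) : List (List String) :=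
  let st1 := (PySem.List.enumerate sent 0).foldl (stepA1 sent delimiters) ([], 0)
  let parts := st1.1
  if parts = [] then [sent]
  else ((PySem.List.enumerate parts 0).foldl (stepA2 parts max_seq_length) ([], [])).1

-- ===== PORT B =====
-- literal transliteration of Source B: one pass, state (out, chunk, part, seen); look-behind flush.
-- body of B's single for-loop
def stepB (delims : PySem.Set String) (max_seq_length : Int) (st : List (List String) × List String × List String × Bool) (char : String) : List (List String) × List String × List String × Bool :=
  let out := st.1
  let chunk := st.2.1
  let part := st.2.2.1 ++ [char]
  if delims.contains char then
    if chunk ≠ [] ∧ (chunk.length : Int) + (part.length : Int) > max_seq_length then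
      -- yield chunk; chunk = []; chunk.extend(part)
      (out ++ [chunk], part, [], true)
    else (out, chunk ++ part, [], true)
  else (out, chunk, part, st.2.2.2)

def split_long_sent_alt (sent : List String) (delimiters : List String) (max_seq_length : Int) : List (List String) :=
  let delims := PySem.Set.ofList delimiters
  let st := sent.foldl (stepB delims max_seq_length) ([], [], [], false)
  if st.2.2.2 = false then [sent] else st.1 ++ [st.2.1]

-- ===== PRECONDITION & SPEC =====
def Spec_split_long_sent (sent : List String) (delimiters : List String) (max_seq_length : Int) (out : List (List String)) : Prop := out = split_long_sent_alt sent delimiters max_seq_length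
instance (sent : List String) (delimiters : List String) (max_seq_length : Int) (out : List (List String)) : Decidable (Spec_split_long_sent sent delimiters max_seq_length out) := by unfold Spec_split_long_sent; infer_instance

-- ===== CLAIM (what is proved, stated in full; the proofs are below) =====
def Claim_equal_split_long_sent : Prop := ∀ (sent : List String) (delimiters : List String) (max_seq_length : Int), Dom_split_long_sent sent delimiters max_seq_length → Spec_split_long_sent sent delimiters max_seq_length (split_long_sent sent delimiters max_seq_length)

-- ===== LEMMAS AND PROOFS =====

-- splitting a character list after each delimiter: (finished parts, pending remainder)
def go1 (del : List String) : List (List String) → List String → List String → (List (List String) × List String)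
  | acc, cur, [] => (acc, cur)
  | acc, cur, c :: cs =>
    if del.contains c then go1 del (acc ++ [cur ++ [c]]) [] cs
    else go1 del acc (cur ++ [c]) cs

-- look-behind greedy merge of parts into chunks
def mrg (m : Int) : List (List String) → List String → List (List String) → (List (List String) × List String)
  | out, chunk, [] => (out, chunk)
  | out, chunk, p :: ps =>
    if chunk ≠ [] ∧ (chunk.length : Int) + (p.length : Int) > m then
      mrg m (out ++ [chunk]) p ps
    else mrg m out (chunk ++ p) ps

-- A's look-ahead merge loop, recursively
def la (m : Int) : List (List String) → List String → List (List String) → List (List String)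
  | out, _, [] => out
  | out, short, [p] => out ++ [short ++ p]
  | out, short, p :: q :: ps =>
    if ((short ++ p).length : Int) + (q.length : Int) > m then
      la m (out ++ [short ++ p]) [] (q :: ps)
    else la m out (short ++ p) (q :: ps)

theorem go1_acc (del : List String) (suf : List String) : ∀ (acc : List (List String)) (cur : List String),
    go1 del acc cur suf = (acc ++ (go1 del [] cur suf).1, (go1 del [] cur suf).2) := by
  induction suf with
  | nil => intro acc cur; simp [go1]
  | cons c cs ih =>
    intro acc cur
    simp only [go1]
    by_cases h : del.contains c = true
    · simp only [h, if_pos, List.nil_append]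
      rw [ih (acc ++ [cur ++ [c]]) [], ih [cur ++ [c]] []]
      simp
    · simp only [h, Bool.false_eq_true, if_false]
      rw [ih acc (cur ++ [c]), ih [] (cur ++ [c])]
theorem go1_parts_ne_nil (del : List String) (suf : List String) : ∀ (acc : List (List String)) (cur : List String),
    ∀ p ∈ (go1 del acc cur suf).1, p ∈ acc ∨ p ≠ [] := by
  induction suf with
  | nil => intro acc cur p hp; exact Or.inl (by simpa [go1] using hp)
  | cons c cs ih =>
    intro acc cur p hp
    simp only [go1] at hp
    by_cases h : del.contains c = true
    · simp only [h, if_pos] at hp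
      rcases ih _ _ p hp with h1 | h1
      · rcases List.mem_append.1 h1 with h2 | h2
        · exact Or.inl h2
        · right; simp at h2; simp [h2]
      · exact Or.inr h1
    · simp only [h, Bool.false_eq_true, if_false] at hp
      exact ih _ _ p hp

-- Phase 1 of A equals go1.
theorem A1 (sent del : List String) : ∀ (suf pre : List String) (acc : List (List String)) (j : ℕ),
    sent = pre ++ suf → j ≤ pre.length →
    ((PySem.List.enumerate suf (pre.length : Int)).foldl (stepA1 sent del) (acc, (j : Int))).1
    = acc ++ (go1 del [] ((sent.drop j).take (pre.length - j)) suf).1 := by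
  intro suf
  induction suf with
  | nil => intro pre acc j hsent hj; simp [PySem.List.enumerate, go1]
  | cons c cs ih =>
    intro pre acc j hsent hj
    rw [PySem.List.enumerate_cons]
    simp only [List.foldl_cons]
    have hcell : (sent.drop j)[pre.length - j]? = some c := by
      rw [hsent, List.getElem?_drop]
      have : j + (pre.length - j) = pre.length := by omega
      rw [this]; simp
    have htake : (sent.drop j).take (pre.length + 1 - j) = (sent.drop j).take (pre.length - j) ++ [c] := by
      have h2 : pre.length + 1 - j = (pre.length - j) + 1 := by omega
      rw [h2, List.take_add_one, hcell]
      simp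
    by_cases h : del.contains c = true
    · simp only [stepA1, h, if_pos]
      have hslice : PySem.List.slice sent (some (j : Int)) (some ((pre.length : Int) + 1))
          = (sent.drop j).take (pre.length - j) ++ [c] := by
        have h1 : ((pre.length : Int) + 1) = ((pre.length + 1 : ℕ) : Int) := by push_cast; ring
        rw [h1, PySem.List.slice_natCast]
        have h2 : pre.length + 1 - j = (pre.length - j) + 1 := by omega
        rw [h2, List.take_add_one, hcell]
        simp
      rw [hslice]
      have h3 : ((pre.length : Int) + 1) = (((pre ++ [c]).length : ℕ) : Int) := by push_cast; simp
      rw [h3]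
      have := ih (pre ++ [c]) (acc ++ [(sent.drop j).take (pre.length - j) ++ [c]]) ((pre ++ [c]).length)
        (by simpa using hsent) (le_refl _)
      rw [this]
      have h5 : (pre ++ [c]).length - (pre ++ [c]).length = 0 := by omega
      rw [h5]
      simp only [List.take_zero]
      simp only [go1, h, if_pos, List.nil_append]
      rw [go1_acc del cs [(sent.drop j).take (pre.length - j) ++ [c]] []]
      simp
    · simp only [stepA1, h, Bool.false_eq_true, if_false]
      have := ih (pre ++ [c]) acc j (by simpa using hsent) (by simp; omega)
      simp only [List.length_append, List.length_cons, List.length_nil] at this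
      have h6 : ((pre.length : Int) + 1) = ((pre.length + 1 : ℕ) : Int) := by push_cast; ring
      rw [h6, this, htake]
      have hmem : ¬ (c ∈ del) := fun hm => h (List.contains_iff_mem.mpr hm)
      simp [go1, hmem]

-- A's merge fold over enumerate equals la.
theorem A2a (parts : List (List String)) (m : Int) : ∀ (suf pre : List (List String)) (out : List (List String)) (short : List String),
    parts = pre ++ suf →
    ((PySem.List.enumerate suf (pre.length : Int)).foldl (stepA2 parts m) (out, short)).1
    = (if suf = [] then out else la m out short suf) := by
  intro suf
  induction suf with
  | nil => intro pre out short h; simp [PySem.List.enumerate]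
  | cons p rest ih =>
    intro pre out short hparts
    rw [PySem.List.enumerate_cons]
    simp only [List.foldl_cons]
    cases rest with
    | nil =>
      have hlast : (pre.length : Int) = (parts.length : Int) - 1 := by
        subst hparts; push_cast; simp
      simp only [stepA2]
      rw [if_pos hlast]
      have hidx : (pre.length : Int) + 1 = (((pre ++ [p]).length : ℕ) : Int) := by push_cast; simp
      rw [hidx, ih (pre ++ [p]) (out ++ [short ++ p]) (short ++ p) (by simpa using hparts)]
      simp [la]
    | cons q ps =>
      have hnotlast : ¬ ((pre.length : Int) = (parts.length : Int) - 1) := by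
        subst hparts; push_cast; simp; omega
      have hget : (PySem.List.pyGet? parts ((pre.length : Int) + 1)).getD [] = q := by
        subst hparts
        have h1 : ((pre.length : Int) + 1) = ((pre.length : Int) + ((1 : ℕ) : Int)) := by norm_num
        rw [h1, PySem.List.pyGet?_append_right]
        simp
      simp only [stepA2, if_neg hnotlast, hget]
      have hidx : (pre.length : Int) + 1 = (((pre ++ [p]).length : ℕ) : Int) := by push_cast; simp
      by_cases hc : ((short ++ p).length : Int) + ((q : List String).length : Int) > m
      · simp only [if_pos hc]
        rw [hidx, ih (pre ++ [p]) (out ++ [short ++ p]) [] (by simpa using hparts)]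
        rw [la]
        simp only [if_pos hc]
        simp
      · simp only [if_neg hc]
        rw [hidx, ih (pre ++ [p]) out (short ++ p) (by simpa using hparts)]
        rw [la]
        simp only [if_neg hc]
        simp

-- la equals mrg, under the invariant the look-ahead flush maintains.
theorem A2b (m : Int) : ∀ (ps : List (List String)) (out : List (List String)) (short : List String),
    ps ≠ [] → (∀ x ∈ ps, x ≠ []) →
    (short = [] ∨ ¬ ((short.length : Int) + ((ps.headI).length : Int) > m)) →
    la m out short ps = (mrg m out short ps).1 ++ [(mrg m out short ps).2] := by
  intro ps
  induction ps with
  | nil => intro out short h; exact absurd rfl h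
  | cons p rest ih =>
    intro out short _ hne hinv
    have hflushfalse : ¬ (short ≠ [] ∧ (short.length : Int) + ((p : List String).length : Int) > m) := by
      rcases hinv with h | h
      · simp [h]
      · simp only [List.headI] at h; tauto
    cases rest with
    | nil =>
      rw [la, mrg, if_neg hflushfalse]
      simp [mrg]
    | cons q ps' =>
      have e1 : mrg m out short (p :: q :: ps') = mrg m out (short ++ p) (q :: ps') := by
        rw [mrg, if_neg hflushfalse]
      rw [la]
      have hchunkne : short ++ p ≠ [] := by
        have := hne p (by simp)
        simp [this]
      by_cases hc : (((short ++ p) : List String).length : Int) + ((q : List String).length : Int) > m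
      · rw [if_pos hc]
        rw [ih (out ++ [short ++ p]) [] (by simp) (fun x hx => hne x (by simp [hx]))
          (Or.inl rfl)]
        have e2 : mrg m out (short ++ p) (q :: ps') = mrg m (out ++ [short ++ p]) q ps' := by
          rw [mrg, if_pos ⟨hchunkne, hc⟩]
        have e3 : mrg m (out ++ [short ++ p]) [] (q :: ps') = mrg m (out ++ [short ++ p]) q ps' := by
          rw [mrg, if_neg (by simp), List.nil_append]
        rw [e1, e2, e3]
      · rw [if_neg hc]
        rw [ih out (short ++ p) (by simp) (fun x hx => hne x (by simp [hx]))
          (Or.inr (by simpa using hc))]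
        rw [e1]

-- set membership in B equals list membership in A
theorem contains_ofList (del : List String) (c : String) :
    (PySem.Set.ofList del).contains c = del.contains c := by
  have h1 : c ∈ PySem.Set.ofList del ↔ c ∈ del := PySem.Set.mem_ofList del c
  by_cases h : c ∈ del
  · simp [h, h1.2 h]
  · simp [h, fun hc => h (h1.1 hc)]

-- B's fold equals go1 then mrg, with the seen flag tracking "a part was completed".
theorem B1 (del : List String) (m : Int) : ∀ (suf : List String) (out : List (List String)) (chunk part : List String) (seen : Bool),
    (suf.foldl (stepB (PySem.Set.ofList del) m) (out, chunk, part, seen))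
    = ((mrg m out chunk (go1 del [] part suf).1).1,
       (mrg m out chunk (go1 del [] part suf).1).2,
       (go1 del [] part suf).2,
       seen || !List.isEmpty (go1 del [] part suf).1) := by
  intro suf
  induction suf with
  | nil => intro out chunk part seen; simp [go1, mrg]
  | cons c cs ih =>
    intro out chunk part seen
    simp only [List.foldl_cons]
    by_cases h : del.contains c = true
    · have hs : (PySem.Set.ofList del).contains c = true := by rw [contains_ofList]; exact h
      by_cases hf : chunk ≠ [] ∧ (chunk.length : Int) + (((part ++ [c]) : List String).length : Int) > m
      · have hstep : stepB (PySem.Set.ofList del) m (out, chunk, part, seen) c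
            = (out ++ [chunk], part ++ [c], [], true) := by
          simp only [stepB, hs, if_pos, if_pos hf]
        rw [hstep, ih (out ++ [chunk]) (part ++ [c]) [] true]
        simp only [go1, h, if_pos, List.nil_append]
        rw [go1_acc del cs [part ++ [c]] []]
        have hm : mrg m out chunk ((part ++ [c]) :: (go1 del [] [] cs).1)
            = mrg m (out ++ [chunk]) (part ++ [c]) (go1 del [] [] cs).1 := by
          rw [mrg, if_pos hf]
        simp [hm]
      · have hstep : stepB (PySem.Set.ofList del) m (out, chunk, part, seen) c
            = (out, chunk ++ (part ++ [c]), [], true) := by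
          simp only [stepB, hs, if_pos, if_neg hf]
        rw [hstep, ih out (chunk ++ (part ++ [c])) [] true]
        simp only [go1, h, if_pos, List.nil_append]
        rw [go1_acc del cs [part ++ [c]] []]
        have hm : mrg m out chunk ((part ++ [c]) :: (go1 del [] [] cs).1)
            = mrg m out (chunk ++ (part ++ [c])) (go1 del [] [] cs).1 := by
          rw [mrg, if_neg hf]
        simp [hm]
    · have hs : (PySem.Set.ofList del).contains c = false := by rw [contains_ofList]; simpa using h
      have hstep : stepB (PySem.Set.ofList del) m (out, chunk, part, seen) c
          = (out, chunk, part ++ [c], seen) := by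
        simp only [stepB, hs, Bool.false_eq_true, if_false]
      rw [hstep, ih out chunk (part ++ [c]) seen]
      have hmem : ¬ (c ∈ del) := fun hm => h (List.contains_iff_mem.mpr hm)
      simp [go1, hmem]

-- ===== VERDICT (by name: the statement is the Claim_ definition above) =====
theorem split_long_sent_spec : Claim_equal_split_long_sent := by
  intro sent del m _
  unfold Spec_split_long_sent split_long_sent split_long_sent_alt
  have hA1 := A1 sent del sent [] [] 0 rfl (by simp)
  simp only [List.length_nil, Nat.cast_zero, List.drop_zero, Nat.sub_zero, List.take_zero,
    List.nil_append] at hA1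
  have hB1 := B1 del m sent [] [] [] false
  by_cases hps : (go1 del [] [] sent).1 = []
  · simp [hA1, hB1, hps, mrg]
  · have hne := go1_parts_ne_nil del sent [] []
    have hmerge := A2a (go1 del [] [] sent).1 m (go1 del [] [] sent).1 [] [] [] rfl
    simp only [List.length_nil, Nat.cast_zero, if_neg hps] at hmerge
    have hla := A2b m (go1 del [] [] sent).1 [] [] hps
      (fun x hx => (hne x hx).resolve_left (by simp)) (Or.inl rfl)
    simp [hA1, hB1, hps, hmerge, hla]
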